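-- pv_equiv track=rewrite | github.com/SiddharthMehra/leetcode-course | greedy/how many apples can you put into the basket.py | maxNumberOfApples
-- ===== SOURCE A (Python) =====
-- from typing import List
--
-- def maxNumberOfApples(weight: List[int]) -> int:
--     weight.sort()
--     ans , count = 0, 0
--     for w in weight:
--         if ans + w<=5000:
--             ans+=w
--             count+=1
--
--     return count
-- ===== SOURCE B (Python) =====
-- from typing import List
--
-- def maxNumberOfApples(weight: List[int]) -> int:
--     # sort in place (same caller-visible mutation as the original), then
--     # build a prefix-sum table and binary-search the first cumulative sum > 5000.
--     weight.sort()
--     prefix = []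
--     acc = 0
--     for w in weight:
--         acc += w
--         prefix.append(acc)
--     lo, hi = 0, len(prefix)
--     while lo < hi:
--         mid = (lo + hi) // 2
--         if 5000 < prefix[mid]:
--             hi = mid
--         else:
--             lo = mid + 1
--     return lo
-- ===== Notes on version B (the rewrite author's own statement) =====
-- stated objective: alternative
-- what changed: replaces the guarded accumulate-and-count scan with a prefix-sum table plus a hand-written binary search for the first cumulative sum exceeding 5000 (valid because after sorting the accepted items form a prefix and the rejected tail has strictly positive weights)
import Mathlib
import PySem

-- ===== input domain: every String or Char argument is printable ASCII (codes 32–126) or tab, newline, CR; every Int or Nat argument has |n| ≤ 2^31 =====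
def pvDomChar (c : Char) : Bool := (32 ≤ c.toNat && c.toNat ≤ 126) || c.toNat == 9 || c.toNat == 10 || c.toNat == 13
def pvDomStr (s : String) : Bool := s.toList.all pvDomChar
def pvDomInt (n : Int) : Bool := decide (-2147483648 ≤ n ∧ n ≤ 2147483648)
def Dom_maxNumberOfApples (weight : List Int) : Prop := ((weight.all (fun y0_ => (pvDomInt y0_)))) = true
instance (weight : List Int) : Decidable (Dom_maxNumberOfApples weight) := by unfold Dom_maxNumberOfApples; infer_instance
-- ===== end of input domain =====

-- B replaces the guarded greedy scan by a prefix-sum table plus a binary search for the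
-- first cumulative sum exceeding 5000; both versions sort the argument in place (the
-- equivalence proved here is about the return value).

-- ===== PORT A =====
def maxNumberOfApples (weight : List Int) : Int :=
  let w := PySem.List.sorted weight (fun x => x) false
  (w.foldl (fun (s : Int × Int) x => if s.1 + x ≤ 5000 then (s.1 + x, s.2 + 1) else s) (0, 0)).2

-- ===== PORT B =====
-- prefix-sum table built by the accumulator loop of Source B
def pvAccum (acc : Int) : List Int → List Int
  | [] => []
  | x :: t => (acc + x) :: pvAccum (acc + x) t

-- Source B's hand-written while-loop binary search; prefix[mid] is in range on every call
-- made by maxNumberOfApples_alt (lo ≤ mid < hi ≤ length), so getD is exact there.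
def pvBisect (a : List Int) (lo hi : Nat) : Nat :=
  if lo < hi then
    let mid := (lo + hi) / 2
    if 5000 < a.getD mid 0 then pvBisect a lo mid else pvBisect a (mid + 1) hi
  else lo
termination_by hi - lo
decreasing_by all_goals omega

def maxNumberOfApples_alt (weight : List Int) : Int :=
  let w := PySem.List.sorted weight (fun x => x) false
  let pfx := pvAccum 0 w
  (pvBisect pfx 0 pfx.length : Int)

-- ===== PRECONDITION & SPEC =====
def Spec_maxNumberOfApples (weight : List Int) (out : Int) : Prop := out = maxNumberOfApples_alt weight
instance (weight : List Int) (out : Int) : Decidable (Spec_maxNumberOfApples weight out) := by unfold Spec_maxNumberOfApples; infer_instance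

-- ===== CLAIM =====
def Claim_equal_maxNumberOfApples : Prop := ∀ (weight : List Int), Dom_maxNumberOfApples weight → Spec_maxNumberOfApples weight (maxNumberOfApples weight)

-- ===== LEMMAS AND PROOFS =====

-- the count A's fold computes, as a structural recursion
def pvG (a : Int) : List Int → Nat
  | [] => 0
  | x :: t => if a + x ≤ 5000 then pvG (a + x) t + 1 else pvG a t

theorem pvFold_snd (w : List Int) : ∀ (a c : Int),
    (w.foldl (fun (s : Int × Int) x => if s.1 + x ≤ 5000 then (s.1 + x, s.2 + 1) else s) (a, c)).2
      = c + (pvG a w : Int) := by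
  induction w with
  | nil => intro a c; simp [pvG]
  | cons x t ih =>
    intro a c
    by_cases h : a + x ≤ 5000
    · simp [pvG, h, List.foldl, ih]; omega
    · simp [pvG, h, List.foldl, ih]

theorem pvG_stuck (w : List Int) : ∀ (a : Int), (∀ y ∈ w, 5000 < a + y) → pvG a w = 0 := by
  induction w with
  | nil => intro a _; rfl
  | cons x t ih =>
    intro a h
    have hx : ¬ a + x ≤ 5000 := by have := h x (by simp); omega
    simp only [pvG, if_neg hx]
    exact ih a (fun y hy => h y (by simp [hy]))

theorem pvAccum_length (w : List Int) : ∀ a, (pvAccum a w).length = w.length := by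
  induction w with
  | nil => intro a; rfl
  | cons x t ih => intro a; simp [pvAccum, ih]

theorem pvAccum_gt (t : List Int) : ∀ (b : Int), 5000 < b → (∀ y ∈ t, 0 < y) →
    ∀ j < t.length, 5000 < (pvAccum b t).getD j 0 := by
  induction t with
  | nil => intro b _ _ j hj; simp at hj
  | cons y t' ih =>
    intro b hb hpos j hj
    cases j with
    | zero =>
      have := hpos y (by simp)
      simp [pvAccum]; omega
    | succ j' =>
      have hy := hpos y (by simp)
      simpa [pvAccum] using
        ih (b + y) (by omega) (fun z hz => hpos z (by simp [hz])) j' (by simpa using hj)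

theorem pvPartition (w : List Int) : ∀ (a : Int), w.Pairwise (· ≤ ·) → a ≤ 5000 →
    pvG a w ≤ w.length ∧
      ∀ j < w.length, ((pvAccum a w).getD j 0 ≤ 5000 ↔ j < pvG a w) := by
  induction w with
  | nil => intro a _ _; exact ⟨Nat.le_refl 0, fun j hj => by simp at hj⟩
  | cons x t ih =>
    intro a hpw ha
    have hx : ∀ y ∈ t, x ≤ y := (List.pairwise_cons.mp hpw).1
    have hpt : t.Pairwise (· ≤ ·) := (List.pairwise_cons.mp hpw).2
    by_cases h : a + x ≤ 5000
    · obtain ⟨hle, hiff⟩ := ih (a + x) hpt h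
      refine ⟨by simp [pvG, h]; omega, ?_⟩
      intro j hj
      cases j with
      | zero => simp [pvAccum, pvG, h]
      | succ j' =>
        have := hiff j' (by simpa using hj)
        simp only [pvAccum, pvG, if_pos h, List.getD_cons_succ]
        omega
    · -- rejected head: every later element is ≥ x > 0, so every prefix sum stays > 5000
      have hxpos : 0 < x := by omega
      have hg0 : pvG a (x :: t) = 0 := by
        simp only [pvG, if_neg h]
        exact pvG_stuck t a (fun y hy => by have := hx y hy; omega)
      refine ⟨by omega, ?_⟩
      intro j hj
      cases j with
      | zero => simp [pvAccum, hg0]; omega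
      | succ j' =>
        have := pvAccum_gt t (a + x) (by omega)
          (fun y hy => by have := hx y hy; omega) j' (by simpa using hj)
        simp only [pvAccum, hg0, List.getD_cons_succ]
        omega

theorem pvBisect_eq (n : Nat) : ∀ (P : List Int) (k lo hi : Nat), hi - lo ≤ n →
    lo ≤ k → k ≤ hi → hi ≤ P.length →
    (∀ j < P.length, (P.getD j 0 ≤ 5000 ↔ j < k)) →
    pvBisect P lo hi = k := by
  induction n with
  | zero =>
    intro P k lo hi hn h1 h2 h3 _
    rw [pvBisect]
    simp only [if_neg (by omega : ¬ lo < hi)]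
    omega
  | succ n ih =>
    intro P k lo hi hn h1 h2 h3 hpart
    rw [pvBisect]
    by_cases hlh : lo < hi
    · simp only [if_pos hlh]
      set mid := (lo + hi) / 2 with hmid
      have hmlt : mid < hi := by omega
      have hmge : lo ≤ mid := by omega
      have hmem := hpart mid (by omega)
      by_cases hc : 5000 < P.getD mid 0
      · simp only [if_pos hc]
        exact ih P k lo mid (by omega) h1 (by omega) (by omega) hpart
      · simp only [if_neg hc]
        have : mid < k := hmem.mp (by omega)
        exact ih P k (mid + 1) hi (by omega) (by omega) h2 h3 hpart
    · simp only [if_neg hlh]; omega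

-- ===== VERDICT =====
theorem maxNumberOfApples_spec : Claim_equal_maxNumberOfApples := by
  intro weight _
  unfold Spec_maxNumberOfApples maxNumberOfApples maxNumberOfApples_alt
  set w := PySem.List.sorted weight (fun x => x) false with hw
  have hpw : w.Pairwise (· ≤ ·) := PySem.List.sorted_pairwise weight (fun x => x)
  obtain ⟨hle, hiff⟩ := pvPartition w 0 hpw (by norm_num)
  have hlen : (pvAccum 0 w).length = w.length := pvAccum_length w 0
  have hb : pvBisect (pvAccum 0 w) 0 (pvAccum 0 w).length = pvG 0 w := by
    refine pvBisect_eq (pvAccum 0 w).length (pvAccum 0 w) (pvG 0 w) 0 _ (by omega)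
      (by omega) (by omega) (by omega) ?_
    intro j hj
    exact hiff j (by omega)
  show _ = ((pvBisect (pvAccum 0 w) 0 (pvAccum 0 w).length : Nat) : Int)
  rw [pvFold_snd w 0 0, hb]
  ring
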